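-- pv_equiv track=rewrite | github.com/jjeong1/huffmandatacomp | finalhuffman.py | masterList
-- ===== SOURCE A (Python) =====
-- def masterList(s): #obtains frequencies
-- 	#-> one list of letters and their frequencies in tuples
-- 	master = []
-- 	considered = []
-- 	for char in s:
-- 		if char not in considered:
-- 			master.append((char,1))
-- 			considered += char
-- 		else: #if the character was already considered
-- 			freqs = considered.count(char)
-- 			master.remove((char,freqs))
-- 			master.append((char,freqs+1))
-- 			considered += char
-- 	return master
-- ===== SOURCE B (Python) =====
-- def masterList(s): #obtains frequencies
--     # One pass builds a frequency table; a reverse scan emits each distinct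
--     # char at its LAST occurrence, then the output is reversed.
--     counts = {}
--     for ch in s:
--         counts[ch] = counts.get(ch, 0) + 1
--     master = []
--     seen = set()
--     for ch in reversed(s):
--         if ch not in seen:
--             seen.add(ch)
--             master.append((ch, counts[ch]))
--     master.reverse()
--     return master
-- ===== Notes on version B (the rewrite author's own statement) =====
-- stated objective: faster
-- what changed: Replaces A's per-character membership/count/remove scans over growing lists by one counting pass plus one reverse scan with a set, building the last-occurrence order directly instead of moving tuples to the end.
import Mathlib
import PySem

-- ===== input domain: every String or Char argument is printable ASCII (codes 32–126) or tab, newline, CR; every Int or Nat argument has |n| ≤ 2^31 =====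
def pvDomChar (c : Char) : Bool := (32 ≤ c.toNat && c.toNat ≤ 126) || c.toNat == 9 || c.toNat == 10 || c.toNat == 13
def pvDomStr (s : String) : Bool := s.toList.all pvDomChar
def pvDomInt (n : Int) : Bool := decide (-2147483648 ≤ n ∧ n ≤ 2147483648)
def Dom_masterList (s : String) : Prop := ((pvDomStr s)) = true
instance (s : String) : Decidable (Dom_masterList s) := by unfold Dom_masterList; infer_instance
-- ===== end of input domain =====

-- B replaces A's quadratic membership/count/remove scans by one counting pass plus one
-- reverse scan with a seen-set (a timing run measured B faster at the largest size).

-- ===== PORT A =====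
-- A's loop state: (master, considered)
def pvStepA (st : List (String × Int) × List String) (char : Char) :
    List (String × Int) × List String :=
  let cs := String.ofList [char]
  if cs ∉ st.2 then
    (st.1 ++ [(cs, (1 : Int))], st.2 ++ [cs])
  else
    let freqs : Int := (PySem.List.count st.2 cs : Int)
    -- (char, freqs) is always an element of master (invariant pvA_inv below), so
    -- Python's list.remove never raises; the `.getD st.1` default is unreachable.
    (((PySem.List.remove? st.1 (cs, freqs)).getD st.1) ++ [(cs, freqs + 1)], st.2 ++ [cs])

def masterList (s : String) : List (String × Int) :=
  (s.toList.foldl pvStepA ([], [])).1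

-- ===== PORT B =====
-- counts[ch] += 1 over the whole string (dict.get(ch, 0) + 1)
def pvCounts (l : List Char) : PySem.Dict String Int :=
  l.foldl (fun d char =>
    let cs := String.ofList [char]
    d.insert cs (d.getD cs 0 + 1)) PySem.Dict.empty

-- B's reverse-scan state: (seen, master); counts[ch] never raises (ch occurs in s)
def pvStepB (counts : PySem.Dict String Int)
    (st : PySem.Set String × List (String × Int)) (char : Char) :
    PySem.Set String × List (String × Int) :=
  let cs := String.ofList [char]
  if PySem.Set.contains st.1 cs then st
  else (PySem.Set.add st.1 cs, st.2 ++ [(cs, counts.getD cs 0)])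

def masterList_alt (s : String) : List (String × Int) :=
  ((s.toList.reverse.foldl (pvStepB (pvCounts s.toList)) (PySem.Set.empty, [])).2).reverse

-- ===== PRECONDITION & SPEC =====
def Spec_masterList (s : String) (out : List (String × Int)) : Prop := out = masterList_alt s
instance (s : String) (out : List (String × Int)) : Decidable (Spec_masterList s out) := by unfold Spec_masterList; infer_instance

-- ===== CLAIM (what is proved, stated in full; the proofs are below) =====
def Claim_equal_masterList : Prop := ∀ (s : String), Dom_masterList s → Spec_masterList s (masterList s)

-- ===== LEMMAS AND PROOFS =====

theorem pvMk_inj : Function.Injective (fun c : Char => String.ofList [c]) := by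
  intro a b h
  have := congrArg String.toList h
  simpa using this

-- distinct chars of p, ordered by last occurrence
def pvLast (p : List Char) : List Char :=
  p.foldl (fun acc c => acc.erase c ++ [c]) []

theorem pvLast_append (p : List Char) (a : Char) :
    pvLast (p ++ [a]) = (pvLast p).erase a ++ [a] := by
  simp [pvLast, List.foldl_append]

theorem pvLast_mem (p : List Char) (c : Char) : c ∈ pvLast p ↔ c ∈ p := by
  induction p using List.reverseRecOn with
  | nil => simp [pvLast]
  | append_singleton q a ih =>
    rw [pvLast_append]
    by_cases h : c = a
    · simp [h]
    · simp [List.mem_erase_of_ne h, ih, h]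

theorem pvLast_nodup (p : List Char) : (pvLast p).Nodup := by
  induction p using List.reverseRecOn with
  | nil => simp [pvLast]
  | append_singleton q a ih =>
    rw [pvLast_append]
    refine List.Nodup.append (ih.erase a) (List.nodup_singleton a) ?_
    intro x hx hx'
    rw [List.mem_singleton] at hx'
    subst hx'
    exact ((ih.mem_erase_iff).mp hx).1 rfl

-- A's loop invariant: master lists the distinct chars in last-occurrence order with
-- their counts so far, considered is the processed prefix.
theorem pvA_inv (p : List Char) :
    p.foldl pvStepA ([], []) =
      ((pvLast p).map (fun c => (String.ofList [c], (p.count c : Int))),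
       p.map (fun c => String.ofList [c])) := by
  induction p using List.reverseRecOn with
  | nil => simp [pvLast]
  | append_singleton q a ih =>
    rw [List.foldl_append, ih, pvLast_append]
    simp only [List.foldl_cons, List.foldl_nil]
    by_cases ha : a ∈ q
    · -- else branch: a seen before
      have hmem : String.ofList [a] ∈ q.map (fun c => String.ofList [c]) :=
        (List.mem_map_of_injective pvMk_inj).mpr ha
      have hcount : PySem.List.count (q.map (fun c => String.ofList [c])) (String.ofList [a])
          = q.count a := by
        simp [PySem.List.count, List.count_map_of_injective q _ pvMk_inj a]
      have hpair : (String.ofList [a], (q.count a : Int)) ∈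
          (pvLast q).map (fun c => (String.ofList [c], (q.count c : Int))) :=
        List.mem_map.mpr ⟨a, (pvLast_mem q a).mpr ha, rfl⟩
      have hinj2 : Function.Injective (fun c : Char => (String.ofList [c], (q.count c : Int))) := by
        intro x y h
        exact pvMk_inj (congrArg Prod.fst h)
      simp only [pvStepA, if_neg (not_not_intro hmem), hcount]
      rw [PySem.List.remove?_eq_some_erase _ _ hpair, Option.getD_some]
      rw [← List.map_erase hinj2]
      have hne : ∀ c ∈ (pvLast q).erase a, c ≠ a := fun c hc =>
        ((pvLast_nodup q).mem_erase_iff.mp hc).1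
      rw [Prod.mk.injEq]
      constructor
      · rw [List.map_append]
        congr 1
        · refine List.map_congr_left fun c hc => ?_
          have : (q ++ [a]).count c = q.count c := by
            simp [List.count_append, (hne c hc).symm]
          simp [this]
        · simp [List.count_append]
      · simp
    · -- then branch: a is new
      have hmem : String.ofList [a] ∉ q.map (fun c => String.ofList [c]) := fun h =>
        ha ((List.mem_map_of_injective pvMk_inj).mp h)
      have herase : (pvLast q).erase a = pvLast q :=
        List.erase_of_not_mem (fun h => ha ((pvLast_mem q a).mp h))
      simp only [pvStepA, if_pos hmem, herase]
      rw [Prod.mk.injEq]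
      constructor
      · rw [List.map_append]
        congr 1
        · refine List.map_congr_left fun c hc => ?_
          have hcq : c ∈ q := (pvLast_mem q c).mp hc
          have : (q ++ [a]).count c = q.count c := by
            have : c ≠ a := fun h => ha (h ▸ hcq)
            simp [List.count_append, this.symm]
          simp [this]
        · simp [List.count_append, List.count_eq_zero_of_not_mem ha]
      · simp

-- keep-first dedup of l relative to an already-seen list
def pvFlt : List Char → List Char → List Char
  | [], _ => []
  | c :: r, seen => if c ∈ seen then pvFlt r seen else c :: pvFlt r (c :: seen)

theorem pvFlt_congr (l : List Char) : ∀ s1 s2, (∀ x, x ∈ s1 ↔ x ∈ s2) →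
    pvFlt l s1 = pvFlt l s2 := by
  induction l with
  | nil => intros; rfl
  | cons c r ih =>
    intro s1 s2 h
    simp only [pvFlt]
    by_cases hc : c ∈ s1
    · rw [if_pos hc, if_pos ((h c).mp hc), ih s1 s2 h]
    · rw [if_neg hc, if_neg (fun hc2 => hc ((h c).mpr hc2))]
      rw [ih (c :: s1) (c :: s2) (by intro x; simp [h x])]

theorem pvFlt_nodup_notmem (l : List Char) : ∀ seen,
    (pvFlt l seen).Nodup ∧ ∀ c ∈ pvFlt l seen, c ∉ seen := by
  induction l with
  | nil => intro seen; simp [pvFlt]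
  | cons c r ih =>
    intro seen
    simp only [pvFlt]
    by_cases hc : c ∈ seen
    · rw [if_pos hc]; exact ih seen
    · rw [if_neg hc]
      obtain ⟨hnd, hnm⟩ := ih (c :: seen)
      refine ⟨List.nodup_cons.mpr ⟨fun h => hnm c h (List.mem_cons_self), hnd⟩, ?_⟩
      intro x hx
      rcases List.mem_cons.mp hx with h | h
      · exact h ▸ hc
      · exact fun hxs => hnm x h (List.mem_cons_of_mem c hxs)

theorem pvFlt_cons (l : List Char) : ∀ (a : Char) (seen : List Char), a ∉ seen →
    pvFlt l (a :: seen) = (pvFlt l seen).erase a := by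
  induction l with
  | nil => intros; rfl
  | cons c r ih =>
    intro a seen ha
    simp only [pvFlt]
    by_cases hc : c ∈ seen
    · rw [if_pos (List.mem_cons_of_mem a hc), if_pos hc, ih a seen ha]
    · by_cases hca : c = a
      · subst hca
        rw [if_pos List.mem_cons_self, if_neg hc, List.erase_cons_head, ih c seen ha]
      · rw [if_neg (by simp [hca, hc]), if_neg hc,
          List.erase_cons_tail (by simp [hca])]
        rw [pvFlt_congr r (c :: a :: seen) (a :: c :: seen) (by intro x; simp; tauto)]
        rw [ih a (c :: seen) (by simp [ha]; exact fun h => hca h.symm)]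

theorem pvFlt_reverse (p : List Char) : pvLast p = (pvFlt p.reverse []).reverse := by
  induction p using List.reverseRecOn with
  | nil => simp [pvLast, pvFlt]
  | append_singleton q a ih =>
    rw [pvLast_append, List.reverse_append, List.reverse_singleton]
    simp only [List.singleton_append, pvFlt, List.not_mem_nil, if_false]
    rw [pvFlt_cons _ a [] List.not_mem_nil]
    rw [List.reverse_cons, ih]
    congr 1
    rw [List.Nodup.erase_eq_filter (List.nodup_reverse.mpr (pvFlt_nodup_notmem q.reverse []).1),
        List.Nodup.erase_eq_filter (pvFlt_nodup_notmem q.reverse []).1,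
        List.filter_reverse]

-- B's reverse-scan invariant, with the seen set tracked abstractly through membership
theorem pvB_inv (counts : PySem.Dict String Int) (r : List Char) :
    ∀ (seen : PySem.Set String) (seenL : List Char) (out : List (String × Int)),
    (∀ c : Char, (PySem.Set.contains seen (String.ofList [c]) = true) ↔ c ∈ seenL) →
    (r.foldl (pvStepB counts) (seen, out)).2 =
      out ++ (pvFlt r seenL).map (fun c => (String.ofList [c], counts.getD (String.ofList [c]) 0)) := by
  induction r with
  | nil => intro seen seenL out _; simp [pvFlt]
  | cons c r ih =>
    intro seen seenL out h
    simp only [List.foldl_cons, pvStepB, pvFlt]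
    by_cases hc : c ∈ seenL
    · have : PySem.Set.contains seen (String.ofList [c]) = true := (h c).mpr hc
      rw [if_pos this, if_pos hc, ih seen seenL out h]
    · have hcf : ¬ (PySem.Set.contains seen (String.ofList [c]) = true) := fun hh => hc ((h c).mp hh)
      rw [if_neg hcf, if_neg hc]
      · rw [ih (PySem.Set.add seen (String.ofList [c])) (c :: seenL)
            (out ++ [(String.ofList [c], counts.getD (String.ofList [c]) 0)]) ?_]
        · simp
        · intro c'
          rw [PySem.Set.contains_iff, PySem.Set.mem_add, ← PySem.Set.contains_iff, h c']
          constructor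
          · rintro (h1 | h1)
            · exact List.mem_cons_of_mem c h1
            · exact (pvMk_inj h1) ▸ List.mem_cons_self
          · intro h1
            rcases List.mem_cons.mp h1 with h1 | h1
            · exact Or.inr (by rw [h1])
            · exact Or.inl h1

theorem pvCounts_getD (p : List Char) (c : Char) :
    (pvCounts p).getD (String.ofList [c]) 0 = (p.count c : Int) := by
  have : pvCounts p =
      (p.map (fun c => String.ofList [c])).foldl
        (fun d x => d.insert x (d.getD x 0 + 1)) PySem.Dict.empty := by
    rw [List.foldl_map]; rfl
  rw [this, PySem.Dict.getD_foldl_insert_add_one, PySem.Dict.getD_empty,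
      List.count_map_of_injective p _ pvMk_inj c]
  simp

-- ===== VERDICT (by name: the statement is the Claim_ definition above) =====
theorem masterList_spec : Claim_equal_masterList := by
  intro s _
  unfold Spec_masterList masterList masterList_alt
  rw [pvA_inv]
  rw [pvB_inv (pvCounts s.toList) s.toList.reverse PySem.Set.empty [] []
      (by intro c; simp [PySem.Set.empty])]
  simp only [List.nil_append]
  have hg : (fun c => (String.ofList [c], (pvCounts s.toList).getD (String.ofList [c]) 0)) =
      (fun c => (String.ofList [c], (s.toList.count c : Int))) := by
    funext c; rw [pvCounts_getD]
  rw [hg, ← List.map_reverse, ← pvFlt_reverse]
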